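-- pv_equiv track=rewrite | github.com/Niols/Des-Scripts-WeeChat | latex.py | apply_modifier
-- ===== SOURCE A (Python) =====
-- def apply_modifier(text, modifier, D):
-- 	text = text.replace(modifier, "^")
-- 	newtext = ""
-- 	mode_normal, mode_modified, mode_long = range(3)
-- 	mode = mode_normal
-- 	for ch in text:
-- 		if mode == mode_normal and ch == '^':
-- 			mode = mode_modified
-- 			continue
-- 		elif mode == mode_modified and ch == '{':
-- 			mode = mode_long
-- 			continue
-- 		elif mode == mode_modified:
-- 			newtext += D.get(ch, ch)
-- 			mode = mode_normal
-- 			continue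
-- 		elif mode == mode_long and ch == '}':
-- 			mode = mode_normal
-- 			continue
--
-- 		if mode == mode_normal:
-- 			newtext += ch
-- 		else:
-- 			newtext += D.get(ch, ch)
-- 	return newtext
-- ===== SOURCE B (Python) =====
-- def apply_modifier(text, modifier, D):
--     text = text.replace(modifier, "^")
--     out = []
--     i = 0
--     n = len(text)
--     while i < n:
--         ch = text[i]
--         if ch != '^':
--             out.append(ch)
--             i += 1
--             continue
--         i += 1
--         if i >= n:
--             break
--         if text[i] == '{':
--             j = i + 1
--             while j < n and text[j] != '}':
--                 c = text[j]
--                 out.append(D.get(c, c))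
--                 j += 1
--             i = j + 1
--         else:
--             c = text[i]
--             out.append(D.get(c, c))
--             i += 1
--     return ''.join(out)
-- ===== Notes on version B (the rewrite author's own statement) =====
-- stated objective: simpler
-- what changed: A's three-state mode machine that reprocesses one character per loop iteration is replaced by a single forward scan that consumes a whole '^'-group (the next character, or the brace-delimited run up to the matching '}') in one step and joins collected pieces at the end.
import Mathlib
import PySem

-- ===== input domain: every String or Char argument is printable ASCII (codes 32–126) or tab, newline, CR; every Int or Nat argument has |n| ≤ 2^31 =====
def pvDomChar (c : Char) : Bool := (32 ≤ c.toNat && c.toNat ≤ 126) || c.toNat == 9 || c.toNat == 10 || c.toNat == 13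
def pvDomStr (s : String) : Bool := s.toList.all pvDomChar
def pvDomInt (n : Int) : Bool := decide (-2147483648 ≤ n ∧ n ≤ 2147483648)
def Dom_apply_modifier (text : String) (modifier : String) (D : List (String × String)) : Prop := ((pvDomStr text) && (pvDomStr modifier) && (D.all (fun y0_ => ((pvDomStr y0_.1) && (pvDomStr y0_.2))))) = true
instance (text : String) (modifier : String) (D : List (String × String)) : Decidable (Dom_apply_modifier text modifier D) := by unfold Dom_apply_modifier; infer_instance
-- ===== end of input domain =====

-- B replaces A's three-state character state machine with a single index scan that
-- handles a whole '^'-group (next char, or the brace-delimited run) per step (objective: simpler).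

-- ===== PORT A =====
-- D.get(ch, ch) on the dict D (association list, first match wins)
def aGet (D : List (String × String)) (ch : Char) : String :=
  PySem.Dict.getD (PySem.Dict.mk D) ch.toString ch.toString

-- one iteration of A's for-loop: state = (mode, newtext); mode 0/1/2 = normal/modified/long
def aStep (D : List (String × String)) (st : Nat × String) (ch : Char) : Nat × String :=
  if st.1 = 0 ∧ ch = '^' then (1, st.2)
  else if st.1 = 1 ∧ ch = '{' then (2, st.2)
  else if st.1 = 1 then (0, st.2 ++ aGet D ch)
  else if st.1 = 2 ∧ ch = '}' then (0, st.2)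
  else if st.1 = 0 then (st.1, st.2 ++ ch.toString)
  else (st.1, st.2 ++ aGet D ch)

def apply_modifier (text : String) (modifier : String) (D : List (String × String)) : String :=
  ((PySem.Str.replace text modifier "^").toList.foldl (aStep D) (0, "")).2

-- ===== PORT B =====
def bGet (D : List (String × String)) (c : Char) : String :=
  PySem.Dict.getD (PySem.Dict.mk D) c.toString c.toString

-- Source B's while loop over the index i, transcribed as recursion on the remaining characters;
-- the inner while over j appending D.get(c, c) until '}' is the takeWhile/dropWhile pair.
def bGo (D : List (String × String)) : List Char → List String
  | [] => []
  | c :: rest =>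
    if c ≠ '^' then c.toString :: bGo D rest
    else match rest with
      | [] => []
      | d :: r2 =>
        if d = '{' then
          (r2.takeWhile (· ≠ '}')).map (bGet D) ++ bGo D ((r2.dropWhile (· ≠ '}')).drop 1)
        else bGet D d :: bGo D r2
termination_by l => l.length
decreasing_by
  all_goals simp only [List.length_cons, List.length_drop]
  · omega
  · have h1 := List.length_dropWhile_le (p := fun c => decide (c ≠ '}')) (l := r2)
    omega
  · omega

def apply_modifier_alt (text : String) (modifier : String) (D : List (String × String)) : String :=
  String.join (bGo D (PySem.Str.replace text modifier "^").toList)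

-- ===== PRECONDITION & SPEC =====
def Spec_apply_modifier (text : String) (modifier : String) (D : List (String × String)) (out : String) : Prop := out = apply_modifier_alt text modifier D
instance (text : String) (modifier : String) (D : List (String × String)) (out : String) : Decidable (Spec_apply_modifier text modifier D out) := by unfold Spec_apply_modifier; infer_instance

-- ===== CLAIM (what is proved, stated in full; the proofs are below) =====
def Claim_equal_apply_modifier : Prop := ∀ (text : String) (modifier : String) (D : List (String × String)), Dom_apply_modifier text modifier D → Spec_apply_modifier text modifier D (apply_modifier text modifier D)

-- ===== LEMMAS AND PROOFS =====

-- B's value when the scan is inside a '^{...}' group (A's mode_long)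
def pvLong (D : List (String × String)) (l : List Char) : String :=
  String.join ((l.takeWhile (· ≠ '}')).map (bGet D)) ++
    String.join (bGo D ((l.dropWhile (· ≠ '}')).drop 1))

-- B's value right after a '^' (A's mode_modified)
def pvCaret (D : List (String × String)) : List Char → String
  | [] => ""
  | d :: r2 => if d = '{' then pvLong D r2 else bGet D d ++ String.join (bGo D r2)

lemma join_cons (s : String) (l : List String) :
    String.join (s :: l) = s ++ String.join l := by
  simp [String.join_eq]

lemma join_append (l₁ l₂ : List String) :
    String.join (l₁ ++ l₂) = String.join l₁ ++ String.join l₂ := by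
  induction l₁ with
  | nil => simp [String.join_eq]
  | cons s t ih => simp [join_cons, ih, String.append_assoc]

lemma bGo_cons_ne (D : List (String × String)) (c : Char) (rest : List Char)
    (hc : c ≠ '^') : bGo D (c :: rest) = c.toString :: bGo D rest := by
  rw [bGo.eq_def]; simp [hc]

lemma join_bGo_caret (D : List (String × String)) (rest : List Char) :
    String.join (bGo D ('^' :: rest)) = pvCaret D rest := by
  match rest with
  | [] => simp [bGo, pvCaret, String.join_eq]
  | d :: r2 =>
    by_cases hd : d = '{'
    · subst hd; simp [bGo, pvCaret, pvLong, join_append]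
    · simp [bGo, pvCaret, hd, join_cons]

lemma main_inv (D : List (String × String)) (l : List Char) : ∀ (acc : String),
    ((l.foldl (aStep D) (0, acc)).2 = acc ++ String.join (bGo D l)) ∧
    ((l.foldl (aStep D) (1, acc)).2 = acc ++ pvCaret D l) ∧
    ((l.foldl (aStep D) (2, acc)).2 = acc ++ pvLong D l) := by
  induction l with
  | nil =>
    intro acc
    simp [bGo, pvCaret, pvLong, String.join_eq]
  | cons c rest ih =>
    intro acc
    refine ⟨?_, ?_, ?_⟩
    · by_cases hc : c = '^'
      · subst hc
        have h : aStep D (0, acc) '^' = (1, acc) := by simp [aStep]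
        simp only [List.foldl_cons, h]
        rw [(ih acc).2.1, join_bGo_caret]
      · have h : aStep D (0, acc) c = (0, acc ++ c.toString) := by
          simp [aStep, hc]
        simp only [List.foldl_cons, h]
        rw [(ih (acc ++ c.toString)).1, bGo_cons_ne D c rest hc]
        simp [join_cons, ← String.append_assoc, String.append_singleton]
    · by_cases hc : c = '{'
      · subst hc
        have h : aStep D (1, acc) '{' = (2, acc) := by simp [aStep]
        simp only [List.foldl_cons, h]
        rw [(ih acc).2.2]
        simp [pvCaret]
      · have h : aStep D (1, acc) c = (0, acc ++ aGet D c) := by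
          simp [aStep, hc]
        simp only [List.foldl_cons, h]
        rw [(ih (acc ++ aGet D c)).1]
        simp [pvCaret, hc, aGet, bGet, String.append_assoc]
    · by_cases hc : c = '}'
      · subst hc
        have h : aStep D (2, acc) '}' = (0, acc) := by simp [aStep]
        simp only [List.foldl_cons, h]
        rw [(ih acc).1]
        simp [pvLong, String.join_eq]
      · have h : aStep D (2, acc) c = (2, acc ++ aGet D c) := by
          simp [aStep, hc]
        simp only [List.foldl_cons, h]
        rw [(ih (acc ++ aGet D c)).2.2]
        simp [pvLong, hc, join_cons, aGet, bGet, String.append_assoc]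

-- ===== VERDICT (by name: the statement is the Claim_ definition above) =====
theorem apply_modifier_spec : Claim_equal_apply_modifier := by
  intro text modifier D _
  unfold Spec_apply_modifier apply_modifier apply_modifier_alt
  rw [(main_inv D (PySem.Str.replace text modifier "^").toList "").1]
  simp
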